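-- pv_equiv track=rewrite | github.com/musclefrog/Programmers_Algorithm | 프로그래머스/3/12938. 최고의 집합/최고의 집합.py | solution
-- ===== SOURCE A (Python) =====
-- def solution(n, s):
--     # n개의 자연수로 합이 s인 집합을 만들 수 없는 경우
--     if n > s:
--         return [-1]
--     # 최대한 균등하게 나누어 곱하는 것이 최대의 곱을 만듦
--     else:
--         num = s // n
--         rem = s % n
--         best = [num] * n
--
--         for i in range(0, rem):
--             best[i] += 1
--
--         return sorted(best)
-- ===== SOURCE B (Python) =====
-- def solution(n, s):
--     # n positive numbers each >= 1 cannot sum to s < n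
--     if n > s:
--         return [-1]
--     # greedy single pass: with k slots left, the smallest member of the optimal
--     # (most balanced) sorted set is s // k; take it and recurse on the rest.
--     out = []
--     for k in range(n, 0, -1):
--         x = s // k
--         out.append(x)
--         s -= x
--     return out
-- ===== Notes on version B (the rewrite author's own statement) =====
-- stated objective: alternative
-- what changed: B replaces A's divmod-plus-increment-loop-plus-sort construction with a single greedy pass that, with k slots remaining, emits s//k and subtracts it, producing the balanced set already in sorted order.
import Mathlib
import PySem

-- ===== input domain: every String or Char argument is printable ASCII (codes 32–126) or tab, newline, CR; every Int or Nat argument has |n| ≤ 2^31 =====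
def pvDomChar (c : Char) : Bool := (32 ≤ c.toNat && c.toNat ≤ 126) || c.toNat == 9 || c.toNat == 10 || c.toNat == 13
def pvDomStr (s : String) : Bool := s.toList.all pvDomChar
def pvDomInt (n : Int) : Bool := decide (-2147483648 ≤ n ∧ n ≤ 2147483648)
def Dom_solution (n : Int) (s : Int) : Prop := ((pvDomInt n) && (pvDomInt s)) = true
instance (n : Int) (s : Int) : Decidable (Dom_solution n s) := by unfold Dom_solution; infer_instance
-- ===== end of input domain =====

-- B builds the sorted balanced set by one greedy pass (emit s//k for k = n..1), instead of A's divmod + increment loop + sort.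


-- ===== PORT A =====
-- best[i] += 1 is ported with List.set/getD: exact here since the loop index i always
-- satisfies 0 ≤ i < rem ≤ len(best) when the loop body runs (Python never raises IndexError here).
def solution (n : Int) (s : Int) : List Int :=
  if n > s then [-1]
  else
    let num := PySem.Int.floordiv s n
    let rem := PySem.Int.mod s n
    let best := List.replicate n.toNat num
    let best := (PySem.List.pyRange 0 rem 1).foldl
      (fun b i => b.set i.toNat (b.getD i.toNat 0 + 1)) best
    PySem.List.sorted best (fun x => x)

-- ===== PORT B =====
def solution_alt (n : Int) (s : Int) : List Int :=
  if n > s then [-1]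
  else
    ((PySem.List.pyRange n 0 (-1)).foldl
      (fun (p : List Int × Int) k =>
        let x := PySem.Int.floordiv p.2 k
        (p.1 ++ [x], p.2 - x)) ([], s)).1

-- ===== PRECONDITION & SPEC =====
-- Pre_ excludes exactly n = 0 with 0 ≤ s, where Python A raises ZeroDivisionError (s // n).
def Pre_solution (n : Int) (s : Int) : Prop := n ≠ 0 ∨ s < 0
instance (n : Int) (s : Int) : Decidable (Pre_solution n s) := by unfold Pre_solution; infer_instance
def pvWitness_solution : Int × Int := (3, 11)

def Spec_solution (n : Int) (s : Int) (out : List Int) : Prop := out = solution_alt n s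
instance (n : Int) (s : Int) (out : List Int) : Decidable (Spec_solution n s out) := by unfold Spec_solution; infer_instance

-- ===== CLAIM (what is proved, stated in full; the proofs are below) =====
def Claim_equal_solution : Prop := ∀ (n : Int) (s : Int), Dom_solution n s → Pre_solution n s → Spec_solution n s (solution n s)

-- ===== LEMMAS AND PROOFS =====

-- The common closed form both proofs target: (n-r) copies of q, then r copies of q+1.
def pvClosed (n rem num : Int) : List Int :=
  List.replicate (n - rem).toNat num ++ List.replicate rem.toNat (num + 1)

-- Bounds of Python's % with a negative divisor: n < s % n ≤ 0.
lemma pv_mod_neg_bounds (s n : Int) (hn : n < 0) :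
    n < PySem.Int.mod s n ∧ PySem.Int.mod s n ≤ 0 := by
  have h := PySem.Int.mod_neg_neg (-s) (-n)
  simp only [neg_neg] at h
  have hpos : (0 : Int) < -n := by omega
  have he : PySem.Int.mod (-s) (-n) = (-s) % (-n) := PySem.Int.mod_eq_emod_of_pos hpos
  have h1 : 0 ≤ (-s) % (-n) := Int.emod_nonneg _ (by omega)
  have h2 : (-s) % (-n) < -n := Int.emod_lt_of_pos _ hpos
  omega

-- A's increment loop turns [num]*m into [num+1]*r ++ [num]*(m-r).
lemma pv_fold_inc (num : Int) : ∀ (r m : Nat), r ≤ m →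
    (PySem.List.pyRange 0 (r : Int) 1).foldl
      (fun b i => b.set i.toNat (b.getD i.toNat 0 + 1)) (List.replicate m num)
    = List.replicate r (num + 1) ++ List.replicate (m - r) num := by
  intro r
  induction r with
  | zero => intro m _; simp [PySem.List.pyRange_one_eq_nil (le_refl (0 : Int))]
  | succ r ih =>
    intro m hrm
    have hcast : ((r + 1 : Nat) : Int) = (r : Int) + 1 := by push_cast; ring
    rw [hcast, PySem.List.pyRange_one_succ_right (by positivity), List.foldl_append,
        ih m (by omega)]
    simp only [List.foldl_cons, List.foldl_nil, Int.toNat_natCast]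
    have hm : m - r = (m - r - 1) + 1 := by omega
    rw [hm, List.replicate_succ]
    have hget : (List.replicate r (num + 1) ++ num :: List.replicate (m - r - 1) num).getD r 0
        = num := by
      rw [List.getD_eq_getElem?_getD, List.getElem?_append_right (by simp)]
      simp
    rw [hget, List.set_append]
    simp [List.replicate_succ' (n := r), List.append_assoc]
    omega

-- A equals the closed form on Pre_.
lemma pv_A_eq (n s : Int) (hpre : Pre_solution n s) (hns : ¬ n > s) :
    solution n s = pvClosed n (PySem.Int.mod s n) (PySem.Int.floordiv s n) := by
  unfold solution pvClosed
  simp only [hns, if_false]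
  rcases lt_trichotomy n 0 with hneg | hz | hpos
  · obtain ⟨h1, h2⟩ := pv_mod_neg_bounds s n hneg
    have hn0 : n.toNat = 0 := by omega
    have hr0 : (PySem.Int.mod s n).toNat = 0 := by omega
    have hd0 : (n - PySem.Int.mod s n).toNat = 0 := by omega
    rw [hn0, hr0, hd0, PySem.List.pyRange_one_eq_nil h2]
    simp [PySem.List.sorted]
  · rcases hpre with h | h
    · exact absurd hz h
    · omega
  · set rem := PySem.Int.mod s n with hrem
    set num := PySem.Int.floordiv s n with hnum
    have he : rem = s % n := PySem.Int.mod_eq_emod_of_pos hpos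
    have h1 : 0 ≤ rem := he ▸ Int.emod_nonneg _ (by omega)
    have h2 : rem < n := he ▸ Int.emod_lt_of_pos _ hpos
    have hcast : rem = ((rem.toNat : Nat) : Int) := by omega
    rw [hcast, pv_fold_inc num rem.toNat n.toNat (by omega)]
    apply PySem.List.sorted_id_eq_of_perm_of_pairwise
    · have hd : (n - ((rem.toNat : Nat) : Int)).toNat = n.toNat - rem.toNat := by omega
      rw [hd, Int.toNat_natCast]
      exact List.perm_append_comm
    · rw [List.pairwise_append]
      refine ⟨List.pairwise_replicate.2 (by omega), List.pairwise_replicate.2 (by omega), ?_⟩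
      intro x hx y hy
      rw [List.eq_of_mem_replicate hx, List.eq_of_mem_replicate hy]
      omega

-- floor division of k*q + r by k (positive k, 0 ≤ r < k) is q.
lemma pv_floordiv_exact (k q r : Int) (hk : 0 < k) (h0 : 0 ≤ r) (hr : r < k) :
    PySem.Int.floordiv (k * q + r) k = q := by
  rw [PySem.Int.floordiv_eq_iff_of_pos hk]
  constructor <;> nlinarith

-- B's greedy fold over k = K..1 with t = K*q + r, 0 ≤ r < K appends the closed form.
lemma pv_greedy : ∀ (K : Nat) (q r : Int) (out : List Int) (t : Int),
    t = K * q + r → 0 ≤ r → r < K →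
    (((PySem.List.pyRange (K : Int) 0 (-1)).foldl
      (fun (p : List Int × Int) k =>
        (p.1 ++ [PySem.Int.floordiv p.2 k], p.2 - PySem.Int.floordiv p.2 k)) (out, t)).1)
    = out ++ List.replicate (K - r.toNat) q ++ List.replicate r.toNat (q + 1) := by
  intro K
  induction K with
  | zero => intro q r out t _ h0 hr; exfalso; simp at hr; omega
  | succ K ih =>
    intro q r out t ht h0 hr
    have hK1 : (0 : Int) < ((K + 1 : Nat) : Int) := by positivity
    rw [PySem.List.pyRange_neg_one_cons hK1, List.foldl_cons]
    have hKc : ((K + 1 : Nat) : Int) = (K : Int) + 1 := by push_cast; ring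
    have hx : PySem.Int.floordiv t ((K + 1 : Nat) : Int) = q := by
      rw [ht, hKc]
      exact pv_floordiv_exact _ q r (by positivity) h0 (by exact_mod_cast hr)
    simp only []
    rw [hx]
    have hstep : ((K + 1 : Nat) : Int) - 1 = (K : Nat) := by push_cast; ring
    rw [hstep]
    by_cases hrK : r < K
    · have := ih q r (out ++ [q]) (t - q) (by rw [ht]; push_cast; ring) h0 (by exact_mod_cast hrK)
      rw [this]
      have hrep : (K + 1) - r.toNat = ((K - r.toNat) + 1) := by omega
      rw [hrep, List.replicate_succ]
      simp [List.append_assoc]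
    · -- r = K
      have hrK' : r = K := by
        have : r < ((K : Nat) : Int) + 1 := by exact_mod_cast hr
        omega
      rcases Nat.eq_zero_or_pos K with hK0 | hKpos
      · subst hK0
        have : r = 0 := by simpa using hrK'
        subst this
        rw [PySem.List.pyRange_neg_one_eq_nil (by norm_num)]
        simp
      · have := ih (q + 1) 0 (out ++ [q]) (t - q)
          (by rw [ht, hrK']; push_cast; ring) le_rfl (by exact_mod_cast hKpos)
        rw [this, hrK']
        simp

-- B equals the closed form on Pre_.
lemma pv_B_eq (n s : Int) (hpre : Pre_solution n s) (hns : ¬ n > s) :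
    solution_alt n s = pvClosed n (PySem.Int.mod s n) (PySem.Int.floordiv s n) := by
  unfold solution_alt pvClosed
  simp only [hns, if_false]
  rcases lt_trichotomy n 0 with hneg | hz | hpos
  · obtain ⟨h1, h2⟩ := pv_mod_neg_bounds s n hneg
    rw [PySem.List.pyRange_neg_one_eq_nil (by omega)]
    have hr0 : (PySem.Int.mod s n).toNat = 0 := by omega
    have hd0 : (n - PySem.Int.mod s n).toNat = 0 := by omega
    simp [hr0, hd0]
  · rcases hpre with h | h
    · exact absurd hz h
    · omega
  · set rem := PySem.Int.mod s n with hrem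
    set num := PySem.Int.floordiv s n with hnum
    have he : rem = s % n := PySem.Int.mod_eq_emod_of_pos hpos
    have h1 : 0 ≤ rem := he ▸ Int.emod_nonneg _ (by omega)
    have h2 : rem < n := he ▸ Int.emod_lt_of_pos _ hpos
    have hs : s = n * num + rem := by
      have := PySem.Int.floordiv_mul_add_mod s n
      rw [← hnum, ← hrem, mul_comm] at this
      omega
    have hn : n = ((n.toNat : Nat) : Int) := by omega
    have hg := pv_greedy n.toNat num rem [] s (by rw [hs, ← hn]) h1 (by omega)
    rw [← hn] at hg
    rw [hg]
    have h3 : (n - rem).toNat = n.toNat - rem.toNat := by omega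
    rw [h3]
    simp

-- ===== VERDICT (by name: the statement is the Claim_ definition above) =====
theorem solution_spec : Claim_equal_solution := by
  intro n s _ hpre
  unfold Spec_solution
  by_cases hns : n > s
  · unfold solution solution_alt; simp [hns]
  · rw [pv_A_eq n s hpre hns, pv_B_eq n s hpre hns]
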